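-- pv_equiv track=rewrite | github.com/crowdgames/sturgeon-pub | util_common.py | grid_size
-- ===== SOURCE A (Python) =====
-- def check(cond, msg):
--     if not cond:
--         raise RuntimeError(msg)
--
-- def grid_size(grid):
--     rows = len(grid)
--     cols = None
--     for row in grid:
--         if cols is None:
--             cols = len(row)
--         else:
--             check(len(row) == cols, 'grid not rectangular')
--     return rows, cols
-- ===== SOURCE B (Python) =====
-- def check(cond, msg):
--     if not cond:
--         raise RuntimeError(msg)
--
-- def grid_size(grid):
--     lengths = {len(row) for row in grid}
--     check(len(lengths) <= 1, 'grid not rectangular')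
--     cols = next(iter(lengths)) if lengths else None
--     return len(grid), cols
-- ===== Notes on version B (the rewrite author's own statement) =====
-- stated objective: simpler
-- what changed: Replaces the stateful first-row/rest-row branching loop with a set of row lengths built in one comprehension and a single cardinality check.
-- outside the precondition, e.g. on grid_size([]): A returns (0, None), B returns (0, None); on grid_size([[1], [1, 2]]): A raises RuntimeError, B raises RuntimeError
import Mathlib
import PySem

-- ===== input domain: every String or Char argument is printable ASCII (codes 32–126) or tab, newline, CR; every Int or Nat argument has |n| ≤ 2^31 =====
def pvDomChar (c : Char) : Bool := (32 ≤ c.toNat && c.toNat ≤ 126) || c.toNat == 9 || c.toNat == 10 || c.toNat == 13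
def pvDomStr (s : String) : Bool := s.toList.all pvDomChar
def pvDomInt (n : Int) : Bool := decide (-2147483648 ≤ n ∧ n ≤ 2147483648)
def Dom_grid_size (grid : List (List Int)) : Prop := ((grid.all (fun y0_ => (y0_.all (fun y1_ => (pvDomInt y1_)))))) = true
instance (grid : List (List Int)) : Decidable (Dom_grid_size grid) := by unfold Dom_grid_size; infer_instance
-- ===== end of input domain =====

-- B replaces A's stateful first-row/rest-row branching loop by a set of row lengths and one cardinality check (simpler decomposition).


-- ===== PORT A =====
-- state: none = raised 'grid not rectangular'; some none = cols is None; some (some c) = cols = c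
def grid_size_step (st : Option (Option Int)) (row : List Int) : Option (Option Int) :=
  match st with
  | none => none
  | some none => some (some (row.length : Int))
  | some (some c) => if (row.length : Int) = c then some (some c) else none

-- result under Pre_ is always 'some (some c)'; the getD defaults never fire there
def grid_size (grid : List (List Int)) : Int × Int :=
  ((grid.length : Int), ((grid.foldl grid_size_step (some none)).getD none).getD 0)

-- ===== PORT B =====
-- lengths = {len(row) for row in grid}; check(len(lengths) <= 1); cols = next(iter(lengths))
-- (under Pre_ the set is a singleton, so its single element is cols; headD's default never fires there)
def grid_size_alt (grid : List (List Int)) : Int × Int :=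
  let lengths : PySem.Set Int := PySem.Set.ofList (grid.map (fun row => (row.length : Int)))
  ((grid.length : Int), lengths.headD 0)

-- ===== PRECONDITION & SPEC =====
-- Pre_ excludes the empty grid, where A returns (0, None) — None is not an Int — and
-- non-rectangular grids, where A raises RuntimeError.
def Pre_grid_size (grid : List (List Int)) : Prop :=
  grid ≠ [] ∧ ∀ row ∈ grid, row.length = (grid.headD []).length
instance (grid : List (List Int)) : Decidable (Pre_grid_size grid) := by unfold Pre_grid_size; infer_instance
def pvWitness_grid_size : List (List Int) := [[1, 2], [3, 4]]

def Spec_grid_size (grid : List (List Int)) (out : Int × Int) : Prop := out = grid_size_alt grid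
instance (grid : List (List Int)) (out : Int × Int) : Decidable (Spec_grid_size grid out) := by unfold Spec_grid_size; infer_instance

-- ===== CLAIM (what is proved, stated in full; the proofs are below) =====
def Claim_equal_grid_size : Prop := ∀ (grid : List (List Int)), Dom_grid_size grid → Pre_grid_size grid → Spec_grid_size grid (grid_size grid)

-- ===== LEMMAS AND PROOFS =====

-- A's loop: once cols = c and every remaining row has length c, the state stays some (some c)
theorem gridA_fold_const (c : Int) (t : List (List Int))
    (h : ∀ row ∈ t, (row.length : Int) = c) :
    t.foldl grid_size_step (some (some c)) = some (some c) := by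
  induction t with
  | nil => rfl
  | cons r rs ih =>
      have hr : (r.length : Int) = c := h r (List.mem_cons_self ..)
      simp [List.foldl, grid_size_step, hr]
      exact ih (fun row hm => h row (List.mem_cons_of_mem _ hm))

-- B's set: all elements equal c, so folding Set.add into [c] leaves [c]
theorem gridB_set_const (c : Int) (t : List Int)
    (h : ∀ x ∈ t, x = c) :
    t.foldl PySem.Set.add [c] = [c] := by
  induction t with
  | nil => rfl
  | cons r rs ih =>
      have hr : r = c := h r (List.mem_cons_self ..)
      have hadd : PySem.Set.add [c] r = [c] := by
        simp [PySem.Set.add, PySem.Set.contains, hr]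
      simp only [List.foldl, hadd]
      exact ih (fun x hm => h x (List.mem_cons_of_mem _ hm))

-- ===== VERDICT (by name: the statement is the Claim_ definition above) =====
theorem grid_size_spec : Claim_equal_grid_size := by
  intro grid _ hpre
  obtain ⟨hne, hlen⟩ := hpre
  match grid with
  | [] => exact absurd rfl hne
  | h :: t =>
      have ht : ∀ row ∈ t, (row.length : Int) = (h.length : Int) := by
        intro row hm
        have := hlen row (List.mem_cons_of_mem _ hm)
        simp [List.headD] at this
        exact_mod_cast this
      show grid_size (h :: t) = grid_size_alt (h :: t)
      unfold grid_size grid_size_alt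
      simp only [List.foldl, grid_size_step, List.map_cons,
        PySem.Set.ofList_eq_foldl, PySem.Set.add]
      rw [gridA_fold_const _ _ ht]
      have hfold : (t.map (fun row => (row.length : Int))).foldl PySem.Set.add [(h.length : Int)] = [(h.length : Int)] := by
        refine gridB_set_const (h.length : Int) _ ?_
        intro x hm
        simp only [List.mem_map] at hm
        obtain ⟨row, hrm, hx⟩ := hm
        exact hx ▸ ht row hrm
      simp [PySem.Set.contains, hfold, List.headD]
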